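-- pv_equiv track=rewrite | github.com/vkumarma/Computational-Biology | lab7.py | is_unbalanced
-- ===== SOURCE A (Python) =====
-- from collections import defaultdict
--
-- def is_unbalanced(graph):
--     edges_dict = defaultdict(lambda: [0, 0])  # 0-th idx outgoing 1-th idx incoming
--     unbalanced_nodes = []
--     for key, value in graph.items():
--         edges_dict[key][0] = len(graph[key])
--         for node in value:
--             edges_dict[node][1] += 1
--
--     for k in edges_dict:
--         if edges_dict[k][0] != edges_dict[k][1]:
--             unbalanced_nodes.append(k)
--
--     if len(unbalanced_nodes) == 0:
--         return False
--     else: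
--         return True
-- ===== SOURCE B (Python) =====
-- def is_unbalanced(graph):
--     # A node is unbalanced iff its out-degree differs from its in-degree.
--     # Equivalently: the multiset of edge sources differs from the multiset of
--     # edge targets.  Compare the two multisets by sorting, no per-node counters.
--     sources = [k for k, v in graph.items() for _ in v]
--     targets = [t for v in graph.values() for t in v]
--     return sorted(sources) != sorted(targets)
-- ===== Notes on version B (the rewrite author's own statement) =====
-- stated objective: alternative
-- what changed: B abandons per-node degree counters entirely: it flattens the graph into the multiset of edge sources and the multiset of edge targets and decides imbalance by comparing their sorted lists, replacing A's dict-of-[out,in] tally plus second scan with a sort-and-compare of two flat lists.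
import Mathlib
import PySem

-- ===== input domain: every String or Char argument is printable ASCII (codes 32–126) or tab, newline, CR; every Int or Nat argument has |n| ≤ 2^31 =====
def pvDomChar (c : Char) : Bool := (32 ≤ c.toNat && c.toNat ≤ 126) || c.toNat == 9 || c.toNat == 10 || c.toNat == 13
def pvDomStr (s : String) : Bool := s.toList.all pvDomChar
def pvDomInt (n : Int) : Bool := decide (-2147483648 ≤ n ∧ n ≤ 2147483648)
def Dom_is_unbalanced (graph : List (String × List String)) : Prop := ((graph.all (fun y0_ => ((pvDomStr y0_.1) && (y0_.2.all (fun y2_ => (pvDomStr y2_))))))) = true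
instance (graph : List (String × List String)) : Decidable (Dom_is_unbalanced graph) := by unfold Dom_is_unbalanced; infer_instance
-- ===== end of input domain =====

-- B drops A's per-node [out,in] tally dict and second scan entirely: it flattens the
-- graph into the multiset of edge sources and the multiset of edge targets and compares
-- their sorted lists; objective: alternative algorithm (multiset comparison).

-- ===== PORT A =====
-- edges_dict entry [out, in] is modelled as a pair (out, in); defaultdict access = getD _ (0,0).
-- inner loop: for node in value: edges_dict[node][1] += 1
def pvInnerA (d : PySem.Dict String (Int × Int)) (n : String) : PySem.Dict String (Int × Int) :=
  d.insert n ((d.getD n (0, 0)).1, (d.getD n (0, 0)).2 + 1)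

-- one iteration of A's first loop: edges_dict[key][0] = len(graph[key]); then the inner loop
def pvStepA (graph : List (String × List String)) (d : PySem.Dict String (Int × Int))
    (kv : String × List String) : PySem.Dict String (Int × Int) :=
  kv.2.foldl pvInnerA
    (d.insert kv.1 (((PySem.Dict.mk graph).getD kv.1 []).length, (d.getD kv.1 (0, 0)).2))

def is_unbalanced (graph : List (String × List String)) : Bool :=
  let edges := graph.foldl (pvStepA graph) PySem.Dict.empty
  let unbalanced := edges.keys.foldl
    (fun acc k => if (edges.getD k (0, 0)).1 ≠ (edges.getD k (0, 0)).2 then acc ++ [k] else acc)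
    ([] : List String)
  if unbalanced.length = 0 then false else true

-- ===== PORT B =====
-- sources = [k for k, v in graph.items() for _ in v]; targets = [t for v in graph.values() for t in v]
def is_unbalanced_alt (graph : List (String × List String)) : Bool :=
  let sources := graph.flatMap (fun kv => kv.2.map (fun _ => kv.1))
  let targets := graph.flatMap (fun kv => kv.2)
  !(PySem.List.sorted sources (fun x => x) false == PySem.List.sorted targets (fun x => x) false)

-- ===== PRECONDITION & SPEC =====
-- Python A receives a dict, whose keys are necessarily distinct; Pre_ states exactly that
-- the association list represents a dict (no duplicate keys). It excludes no dict input.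
def Pre_is_unbalanced (graph : List (String × List String)) : Prop :=
  (graph.map (·.1)).Nodup
instance (graph : List (String × List String)) : Decidable (Pre_is_unbalanced graph) := by
  unfold Pre_is_unbalanced; infer_instance

def pvWitness_is_unbalanced : (List (String × List String)) :=
  [("a", ["b", "b"]), ("b", ["a"])]

def Spec_is_unbalanced (graph : List (String × List String)) (out : Bool) : Prop :=
  out = is_unbalanced_alt graph
instance (graph : List (String × List String)) (out : Bool) :
    Decidable (Spec_is_unbalanced graph out) := by unfold Spec_is_unbalanced; infer_instance

-- ===== CLAIM (what is proved, stated in full; the proofs are below) =====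
def Claim_equal_is_unbalanced : Prop :=
  ∀ (graph : List (String × List String)), Dom_is_unbalanced graph →
    Pre_is_unbalanced graph → Spec_is_unbalanced graph (is_unbalanced graph)

-- ===== LEMMAS AND PROOFS =====

-- A's step with the graph[key] re-lookup replaced by kv.2 (valid on nodup keys, below)
def pvStepA' (d : PySem.Dict String (Int × Int)) (kv : String × List String) :
    PySem.Dict String (Int × Int) :=
  kv.2.foldl pvInnerA (d.insert kv.1 ((kv.2.length : Int), (d.getD kv.1 (0, 0)).2))

-- the multiset of edge sources / edge targets of a graph suffix
def pvSrc (g : List (String × List String)) : List String :=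
  g.flatMap (fun kv => kv.2.map (fun _ => kv.1))
def pvTgt (g : List (String × List String)) : List String :=
  g.flatMap (fun kv => kv.2)

lemma pv_stepA_eq (graph : List (String × List String)) (h : (graph.map (·.1)).Nodup) :
    graph.foldl (pvStepA graph) PySem.Dict.empty = graph.foldl pvStepA' PySem.Dict.empty := by
  apply PySem.List.foldl_congr_mem'
  intro kv hkv d
  have hitems : (kv.1, kv.2) ∈ (PySem.Dict.mk graph).items := by simpa using hkv
  have hnod : (PySem.Dict.mk graph).keys.Nodup := by simpa [PySem.Dict.keys_mk] using h
  have := PySem.Dict.getD_of_mem_items (PySem.Dict.mk graph) hitems hnod []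
  simp [pvStepA, pvStepA', this]

-- the inner incoming loop: snd gains the count of k in v, fst is untouched
lemma pv_inner_getD (v : List String) (d : PySem.Dict String (Int × Int)) (k : String) :
    (v.foldl pvInnerA d).getD k (0, 0)
      = ((d.getD k (0, 0)).1, (d.getD k (0, 0)).2 + (v.count k : Int)) := by
  induction v generalizing d with
  | nil => simp
  | cons n t ih =>
    rw [List.foldl_cons, ih]
    simp only [pvInnerA, PySem.Dict.getD_insert, List.count_cons]
    by_cases hk : k = n
    · subst hk
      simp only [beq_self_eq_true, if_pos]
      rw [Prod.mk.injEq]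
      exact ⟨rfl, by push_cast; ring⟩
    · have h1 : (k == n) = false := by simp [hk]
      have h2 : (n == k) = false := by simp [Ne.symm hk]
      simp [hk, h2]

lemma pv_stepA'_getD (kv : String × List String) (d : PySem.Dict String (Int × Int))
    (k : String) :
    (pvStepA' d kv).getD k (0, 0)
      = (if k = kv.1 then (kv.2.length : Int) else (d.getD k (0, 0)).1,
         (d.getD k (0, 0)).2 + (kv.2.count k : Int)) := by
  unfold pvStepA'
  rw [pv_inner_getD]
  rw [PySem.Dict.getD_insert]
  split_ifs with hk
  · subst hk; simp
  · simp

lemma pv_mem_keys_inner (v : List String) (d : PySem.Dict String (Int × Int)) (k : String) :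
    k ∈ (v.foldl pvInnerA d).keys ↔ k ∈ v ∨ k ∈ d.keys := by
  induction v generalizing d with
  | nil => simp
  | cons n t ih =>
    rw [List.foldl_cons, ih]
    simp only [pvInnerA, PySem.Dict.mem_keys_insert, List.mem_cons]
    tauto

lemma pv_mem_keys_final (rest : List (String × List String))
    (dA : PySem.Dict String (Int × Int)) (k : String) :
    k ∈ (rest.foldl pvStepA' dA).keys
      ↔ (∃ kv ∈ rest, k = kv.1 ∨ k ∈ kv.2) ∨ k ∈ dA.keys := by
  induction rest generalizing dA with
  | nil => simp
  | cons kv t ih =>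
    rw [List.foldl_cons, ih]
    simp only [pvStepA', pv_mem_keys_inner, PySem.Dict.mem_keys_insert, List.mem_cons]
    constructor
    · rintro (⟨p, hp, h⟩ | h2 | h3 | h4)
      · exact Or.inl ⟨p, Or.inr hp, h⟩
      · exact Or.inl ⟨kv, Or.inl rfl, Or.inr h2⟩
      · exact Or.inl ⟨kv, Or.inl rfl, Or.inl h3⟩
      · exact Or.inr h4
    · rintro (⟨p, hp | hp, h⟩ | h2)
      · subst hp; tauto
      · exact Or.inl ⟨p, hp, h⟩
      · tauto

-- main invariant: the final dict holds the source count and target count of each node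
lemma pv_main (rest : List (String × List String)) (dA : PySem.Dict String (Int × Int))
    (hnod : (rest.map (·.1)).Nodup)
    (hfst : ∀ p ∈ rest, (dA.getD p.1 (0, 0)).1 = 0) (k : String) :
    (rest.foldl pvStepA' dA).getD k (0, 0)
      = ((dA.getD k (0, 0)).1 + ((pvSrc rest).count k : Int),
         (dA.getD k (0, 0)).2 + ((pvTgt rest).count k : Int)) := by
  induction rest generalizing dA with
  | nil => simp [pvSrc, pvTgt]
  | cons kv t ih =>
    rw [List.map_cons, List.nodup_cons] at hnod
    rw [List.foldl_cons, ih _ hnod.2]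
    · have hsplitS : (pvSrc (kv :: t)).count k
          = (kv.2.map (fun _ => kv.1)).count k + (pvSrc t).count k := by
        simp [pvSrc, List.flatMap_cons, List.count_append]
      have hsplitT : (pvTgt (kv :: t)).count k = kv.2.count k + (pvTgt t).count k := by
        simp [pvTgt, List.flatMap_cons, List.count_append]
      have hrep : (kv.2.map (fun _ => kv.1)).count k
          = if k = kv.1 then kv.2.length else 0 := by
        split_ifs with hk
        · subst hk
          rw [List.count_eq_length.mpr]
          · simp
          · intro b hb
            simp only [List.mem_map] at hb
            obtain ⟨_, _, rfl⟩ := hb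
            simp
        · refine List.count_eq_zero.mpr ?_
          simp only [List.mem_map]
          rintro ⟨x, _, rfl⟩
          exact hk rfl
      rw [pv_stepA'_getD, hsplitS, hsplitT, hrep]
      split_ifs with hk
      · subst hk
        rw [hfst kv (List.mem_cons_self)]
        rw [Prod.mk.injEq]
        constructor <;> push_cast <;> ring
      · rw [Prod.mk.injEq]
        constructor <;> push_cast <;> ring
    · intro p hp
      rw [pv_stepA'_getD]
      have hne : p.1 ≠ kv.1 := by
        intro he; exact hnod.1 (he ▸ List.mem_map_of_mem hp)
      rw [if_neg hne]
      exact hfst p (List.mem_cons_of_mem _ hp)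

-- every edge endpoint is a key of the final dict (for the empty start)
lemma pv_src_tgt_mem_keys (graph : List (String × List String)) (k : String)
    (h : k ∈ pvSrc graph ∨ k ∈ pvTgt graph) :
    k ∈ (graph.foldl pvStepA' PySem.Dict.empty).keys := by
  rw [pv_mem_keys_final]
  left
  rcases h with h | h
  · simp only [pvSrc, List.mem_flatMap, List.mem_map] at h
    obtain ⟨kv, hkv, a, ha, hk⟩ := h
    exact ⟨kv, hkv, Or.inl hk.symm⟩
  · simp only [pvTgt, List.mem_flatMap] at h
    obtain ⟨kv, hkv, hm⟩ := h
    exact ⟨kv, hkv, Or.inr hm⟩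

-- ===== VERDICT (by name: the statement is the Claim_ definition above) =====
theorem is_unbalanced_spec : Claim_equal_is_unbalanced := by
  intro graph _ hpre
  unfold Spec_is_unbalanced is_unbalanced is_unbalanced_alt
  rw [pv_stepA_eq graph hpre]
  set eA := graph.foldl pvStepA' PySem.Dict.empty with heA
  have hval : ∀ k, eA.getD k (0, 0) = (((pvSrc graph).count k : Int), ((pvTgt graph).count k : Int)) := by
    intro k
    rw [heA, pv_main graph PySem.Dict.empty hpre (by intro p _; rfl) k]
    simp
  show (if (List.foldl
      (fun acc k => if (eA.getD k (0, 0)).1 ≠ (eA.getD k (0, 0)).2 then acc ++ [k] else acc)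
      [] eA.keys).length = 0 then false else true)
    = !(PySem.List.sorted (pvSrc graph) (fun x => x) false
        == PySem.List.sorted (pvTgt graph) (fun x => x) false)
  rw [PySem.List.foldl_append_ite_eq_filter
    (fun k => (eA.getD k (0, 0)).1 ≠ (eA.getD k (0, 0)).2) eA.keys []]
  rw [List.nil_append]
  by_cases hz : ∀ k ∈ eA.keys, (eA.getD k (0, 0)).1 = (eA.getD k (0, 0)).2
  · have hperm : (pvSrc graph).Perm (pvTgt graph) := by
      rw [List.perm_iff_count]
      intro k
      by_cases hk : k ∈ eA.keys
      · have h1 := hz k hk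
        rw [hval k] at h1
        have h2 : ((pvSrc graph).count k : Int) = ((pvTgt graph).count k : Int) := h1
        exact_mod_cast h2
      · have hs : k ∉ pvSrc graph := fun hm => hk (pv_src_tgt_mem_keys graph k (Or.inl hm))
        have ht : k ∉ pvTgt graph := fun hm => hk (pv_src_tgt_mem_keys graph k (Or.inr hm))
        rw [List.count_eq_zero.mpr hs, List.count_eq_zero.mpr ht]
    rw [if_pos, (PySem.List.sorted_id_eq_sorted_id_iff_perm _ _).mpr hperm]
    · simp
    · rw [List.length_eq_zero_iff, List.filter_eq_nil_iff]
      intro k hk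
      simp [hz k hk]
  · push Not at hz
    obtain ⟨x, hx, hne⟩ := hz
    have hcne : (pvSrc graph).count x ≠ (pvTgt graph).count x := by
      intro he
      apply hne
      rw [hval x]
      show ((pvSrc graph).count x : Int) = ((pvTgt graph).count x : Int)
      exact_mod_cast he
    have hnp : ¬ (pvSrc graph).Perm (pvTgt graph) := fun hp =>
      hcne (List.perm_iff_count.mp hp x)
    have hsne : PySem.List.sorted (pvSrc graph) (fun x => x) false
        ≠ PySem.List.sorted (pvTgt graph) (fun x => x) false := fun he =>
      hnp ((PySem.List.sorted_id_eq_sorted_id_iff_perm _ _).mp he)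
    rw [if_neg]
    · simp [hsne]
    · intro hlen
      rw [List.length_eq_zero_iff, List.filter_eq_nil_iff] at hlen
      exact hne (by simpa using hlen x hx)
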